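-- pv_equiv track=rewrite | github.com/ErikThorsson/binance-trade-bot | trade-bot.py | _order_params
-- ===== SOURCE A (Python) =====
-- def _order_params(data):
--     """Convert params to list with signature as last element
--
--     :param data:
--     :return:
--
--     """
--     has_signature = False
--     params = []
--     for key, value in data.items():
--         if key == 'signature':
--             has_signature = True
--         else:
--             params.append((key, value))
--     if has_signature:
--         params.append(('signature', data['signature']))
--     return params
-- ===== SOURCE B (Python) =====
-- def _order_params(data):
--     """Convert params to list with signature as last element (stable sort:
--     every non-'signature' item keeps its insertion order, 'signature' goes last)."""
--     return sorted(data.items(), key=lambda kv: kv[0] == 'signature')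
-- ===== Notes on version B (the rewrite author's own statement) =====
-- stated objective: idiomatic
-- what changed: Replaced the explicit flag-and-append loop plus the final dict re-lookup of the signature value by a single stable sort with the boolean key kv[0]=='signature'; Pre_ excludes only association lists with a repeated signature key, which encode no Python dict (dict keys are unique), so no actual Python input is excluded.
import Mathlib
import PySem

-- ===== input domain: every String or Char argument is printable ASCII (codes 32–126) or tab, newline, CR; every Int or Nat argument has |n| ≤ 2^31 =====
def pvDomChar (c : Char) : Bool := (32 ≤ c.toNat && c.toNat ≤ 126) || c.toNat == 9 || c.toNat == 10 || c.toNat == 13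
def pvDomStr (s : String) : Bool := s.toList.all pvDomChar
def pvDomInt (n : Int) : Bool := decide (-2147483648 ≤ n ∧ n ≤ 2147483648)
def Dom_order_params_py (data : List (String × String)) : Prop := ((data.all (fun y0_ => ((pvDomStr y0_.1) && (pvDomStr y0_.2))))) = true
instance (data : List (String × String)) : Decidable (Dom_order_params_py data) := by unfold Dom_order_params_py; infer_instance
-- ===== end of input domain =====

-- B replaces A's flag-and-append loop (plus dict re-lookup) by one stable sort on the
-- boolean key "is the key 'signature'"; proved equal on dict-like inputs (at most one
-- 'signature' key). Same cost class in practice; objective: idiomatic.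

-- ===== PORT A =====
def order_params_py (data : List (String × String)) : List (String × String) :=
  -- has_signature = False; params = []; for key, value in data.items(): …
  let st := data.foldl
    (fun (st : Bool × List (String × String)) kv =>
      if kv.1 = "signature" then (true, st.2) else (st.1, st.2 ++ [kv]))
    (false, [])
  -- if has_signature: params.append(('signature', data['signature']))
  if st.1 then
    -- data['signature']: first-match dict lookup; the .getD "" default is unreachable,
    -- since st.1 = true only when a 'signature' key occurs in data
    st.2 ++ [("signature", ((PySem.Dict.mk data).get? "signature").getD "")]
  else st.2

-- ===== PORT B =====
def order_params_py_alt (data : List (String × String)) : List (String × String) :=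
  -- sorted(data.items(), key=lambda kv: kv[0] == 'signature')  (stable; False < True)
  PySem.List.sorted data (fun kv => kv.1 == "signature")

-- ===== PRECONDITION & SPEC =====
-- Pre_ excludes association lists with a repeated 'signature' key: they encode no Python
-- dict (dict keys are unique), so the assoc-list ports' behaviour there models no Python input.
def Pre_order_params_py (data : List (String × String)) : Prop :=
  (data.map Prod.fst).count "signature" ≤ 1
instance (data : List (String × String)) : Decidable (Pre_order_params_py data) := by
  unfold Pre_order_params_py; infer_instance

def pvWitness_order_params_py : (List (String × String)) :=
  [("a", "1"), ("signature", "s"), ("b", "2")]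

def Spec_order_params_py (data : List (String × String)) (out : List (String × String)) : Prop := out = order_params_py_alt data
instance (data : List (String × String)) (out : List (String × String)) : Decidable (Spec_order_params_py data out) := by unfold Spec_order_params_py; infer_instance

-- ===== CLAIM (what is proved, stated in full; the proofs are below) =====
def Claim_equal_order_params_py : Prop := ∀ (data : List (String × String)), Dom_order_params_py data → Pre_order_params_py data → Spec_order_params_py data (order_params_py data)

-- ===== LEMMAS AND PROOFS =====

-- inserting a false-keyed element in front of an all-true-keyed tail
theorem insertBy_bool_front {α : Type} (key : α → Bool) (x : α) (ss : List α)
    (hx : key x = false) (hss : ∀ a ∈ ss, key a = true) :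
    PySem.List.insertBy (fun a b => decide (key a < key b)) x ss = x :: ss := by
  cases ss with
  | nil => simp [PySem.List.insertBy]
  | cons s t =>
      have hs : key s = true := hss s (by simp)
      simp [PySem.List.insertBy, hx, hs]

-- skipping an all-false-keyed prefix
theorem insertBy_bool_skip {α : Type} (key : α → Bool) (x : α) (ns ss : List α)
    (hx : key x = false) (hns : ∀ a ∈ ns, key a = false) :
    PySem.List.insertBy (fun a b => decide (key a < key b)) x (ns ++ ss)
      = ns ++ PySem.List.insertBy (fun a b => decide (key a < key b)) x ss := by
  induction ns with
  | nil => simp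
  | cons n t ih =>
      have hn : key n = false := hns n (by simp)
      have ht : ∀ a ∈ t, key a = false := fun a ha => hns a (by simp [ha])
      simp [PySem.List.insertBy, hx, hn, ih ht]

-- the stable insertion fold over a boolean key keeps a false/true partition
theorem foldl_insertBy_bool_partition {α : Type} (key : α → Bool) (xs ns ss : List α)
    (hns : ∀ a ∈ ns, key a = false) (hss : ∀ a ∈ ss, key a = true) :
    xs.foldl (fun acc x => PySem.List.insertBy (fun a b => decide (key a < key b)) x acc) (ns ++ ss)
      = (ns ++ xs.filter (fun x => !key x)) ++ (ss ++ xs.filter key) := by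
  induction xs generalizing ns ss with
  | nil => simp
  | cons x t ih =>
      by_cases hx : key x = true
      · have hnb : ∀ y ∈ ns ++ ss, (decide (key x < key y)) = false := by
          intro y _; simp [hx, Bool.lt_iff]
        have := PySem.List.insertBy_of_forall_not_before
          (fun a b => decide (key a < key b)) x (ns ++ ss) hnb
        have hss' : ∀ a ∈ ss ++ [x], key a = true := by
          intro a ha; rcases List.mem_append.mp ha with h | h
          · exact hss a h
          · simp at h; subst h; exact hx
        simp only [List.foldl_cons, this, List.append_assoc]
        rw [ih ns (ss ++ [x]) hns hss']
        simp [hx]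
      · have hx' : key x = false := by simpa using hx
        have hstep :
            PySem.List.insertBy (fun a b => decide (key a < key b)) x (ns ++ ss)
              = (ns ++ [x]) ++ ss := by
          rw [insertBy_bool_skip key x ns ss hx' hns,
              insertBy_bool_front key x ss hx' hss]
          simp
        have hns' : ∀ a ∈ ns ++ [x], key a = false := by
          intro a ha; rcases List.mem_append.mp ha with h | h
          · exact hns a h
          · simp at h; subst h; exact hx'
        simp only [List.foldl_cons, hstep]
        rw [ih (ns ++ [x]) ss hns' hss]
        simp [hx']

-- B computes the stable false/true partition
theorem alt_eq_partition (data : List (String × String)) :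
    order_params_py_alt data
      = data.filter (fun kv => !(kv.1 == "signature"))
        ++ data.filter (fun kv => kv.1 == "signature") := by
  unfold order_params_py_alt
  rw [PySem.List.sorted_eq_foldl_insertBy]
  simpa using
    foldl_insertBy_bool_partition (fun kv => kv.1 == "signature") data [] []
      (by simp) (by simp)

-- A's loop, characterised: flag = any, params = filter
theorem a_foldl_eq (xs : List (String × String)) (b : Bool) (acc : List (String × String)) :
    xs.foldl
      (fun (st : Bool × List (String × String)) kv =>
        if kv.1 = "signature" then (true, st.2) else (st.1, st.2 ++ [kv]))
      (b, acc)
      = (b || xs.any (fun kv => kv.1 == "signature"),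
         acc ++ xs.filter (fun kv => !(kv.1 == "signature"))) := by
  induction xs generalizing b acc with
  | nil => simp
  | cons kv t ih =>
      by_cases h : kv.1 = "signature"
      · simp [h, ih]
      · have hb : (kv.1 == "signature") = false := by simp [h]
        simp [h, hb, ih]

-- when at most one 'signature' key occurs and one does, the sig-filter is exactly
-- the pair A appends from the dict lookup
theorem filter_sig_eq (xs : List (String × String))
    (hc : (xs.filter (fun kv => kv.1 == "signature")).length ≤ 1)
    (hf : xs.any (fun kv => kv.1 == "signature") = true) :
    xs.filter (fun kv => kv.1 == "signature")
      = [("signature", ((PySem.Dict.mk xs).get? "signature").getD "")] := by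
  induction xs with
  | nil => simp at hf
  | cons kv t ih =>
      obtain ⟨k, v⟩ := kv
      by_cases h : k = "signature"
      · subst h
        have hrest : t.filter (fun kv => kv.1 == "signature") = [] := by
          have h1 := hc
          rw [List.filter_cons] at h1
          simp at h1
          exact List.filter_eq_nil_iff.mpr (by rintro ⟨a, b⟩ hm; simpa using h1 a b hm)
        simp [hrest, PySem.Dict.get?]
      · have hb : (k == "signature") = false := by simp [h]
        have hc' : (t.filter (fun kv => kv.1 == "signature")).length ≤ 1 := by
          simpa [List.filter_cons, hb] using hc
        have hf' : t.any (fun kv => kv.1 == "signature") = true := by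
          simpa [hb] using hf
        have := ih hc' hf'
        simpa [List.filter_cons, hb, PySem.Dict.get?, List.find?] using this

-- count of 'signature' among the keys is the length of the sig-filter
theorem count_eq_filter_length (xs : List (String × String)) :
    (xs.map Prod.fst).count "signature"
      = (xs.filter (fun kv => kv.1 == "signature")).length := by
  induction xs with
  | nil => simp
  | cons kv t ih =>
      by_cases h : kv.1 = "signature"
      · simp [h, ih]
      · have hb : (kv.1 == "signature") = false := by simp [h]
        simp [h, hb, ih]

-- ===== VERDICT (by name: the statement is the Claim_ definition above) =====
theorem order_params_py_spec : Claim_equal_order_params_py := by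
  intro data _ hpre
  unfold Spec_order_params_py
  rw [alt_eq_partition]
  unfold order_params_py
  rw [a_foldl_eq]
  by_cases hf : data.any (fun kv => kv.1 == "signature") = true
  · have hc : (data.filter (fun kv => kv.1 == "signature")).length ≤ 1 := by
      have := hpre
      unfold Pre_order_params_py at this
      rw [count_eq_filter_length] at this
      exact this
    simp only [hf, Bool.or_true]
    rw [filter_sig_eq data hc hf]
    simp
  · have hempty : data.filter (fun kv => kv.1 == "signature") = [] := by
      simp only [Bool.not_eq_true] at hf
      rw [List.filter_eq_nil_iff]
      intro kv hkv
      simpa using List.any_eq_false.mp hf kv hkv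
    simp [hf, hempty]
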